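-- pv_equiv track=rewrite | github.com/capjamesg/suffix-array | suffix.py | search
-- ===== SOURCE A (Python) =====
-- def search(string_to_find, indexed_suffix_array):
--     """Search the suffix array for all instances of a string."""
--     start = 0
--     end = len(indexed_suffix_array)
--
--     while start < end:
--         mid_point = (start + end) // 2
--
--         if string_to_find > indexed_suffix_array[mid_point][0]:
--             start = mid_point + 1
--         else:
--             end = mid_point
--
--     end = len(indexed_suffix_array)
--     init_start = start
--
--     while start < end:
--         mid_point = (start + end) // 2
--
--         if indexed_suffix_array[mid_point][0].startswith(string_to_find):
--             start = mid_point + 1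
--         else:
--             end = mid_point
--
--     return [indexed_suffix_array[i] for i in range(init_start, start)]
-- ===== SOURCE B (Python) =====
-- def search(string_to_find, indexed_suffix_array):
--     """Search the suffix array for all instances of a string."""
--     return [entry for entry in indexed_suffix_array
--             if entry[0].startswith(string_to_find)]
-- ===== Notes on version B (the rewrite author's own statement) =====
-- stated objective: simpler
-- what changed: Replaces A's two hand-written binary searches plus index-range reconstruction by a single linear filter keeping exactly the entries whose first component starts with the query; on a sorted suffix array the matching entries form exactly A's contiguous block.
-- outside the precondition, e.g. on search('a', [('b', 0), ('a', 1)]): A returns [('b', 0), ('a', 1)], B returns [('a', 1)]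
import Mathlib
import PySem

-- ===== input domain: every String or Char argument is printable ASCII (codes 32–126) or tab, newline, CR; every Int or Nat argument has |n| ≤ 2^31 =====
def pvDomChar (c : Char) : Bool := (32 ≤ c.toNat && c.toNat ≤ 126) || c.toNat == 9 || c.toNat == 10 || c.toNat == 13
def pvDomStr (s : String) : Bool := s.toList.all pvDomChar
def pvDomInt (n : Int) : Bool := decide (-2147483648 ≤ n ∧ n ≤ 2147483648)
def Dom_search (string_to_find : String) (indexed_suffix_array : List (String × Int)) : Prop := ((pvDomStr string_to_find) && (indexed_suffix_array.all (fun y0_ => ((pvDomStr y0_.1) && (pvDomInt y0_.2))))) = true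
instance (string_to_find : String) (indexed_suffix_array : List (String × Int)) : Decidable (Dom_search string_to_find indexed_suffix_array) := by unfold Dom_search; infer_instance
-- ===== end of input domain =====

-- B replaces A's two binary searches by one linear filter over the array: simpler, same result
-- on sorted suffix arrays (return value only; neither program mutates its arguments).

-- ===== PORT A =====
-- first while loop: binary search moving 'start' right while string_to_find > arr[mid][0];
-- fuel (= e - start at each call) only bounds the recursion, the loop itself never exhausts it
def searchLo (string_to_find : String) (arr : List (String × Int)) : Nat → Nat → Nat → Nat
  | 0, start, _ => start
  | fuel + 1, start, e =>
    if start < e then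
      match arr[(start + e) / 2]? with
      | none => start  -- unreachable: start < e ≤ arr.length throughout (Python would raise IndexError)
      | some entry =>
        if entry.1 < string_to_find then searchLo string_to_find arr fuel ((start + e) / 2 + 1) e
        else searchLo string_to_find arr fuel start ((start + e) / 2)
    else start

-- second while loop: binary search moving 'start' right while arr[mid][0].startswith(string_to_find)
def searchHi (string_to_find : String) (arr : List (String × Int)) : Nat → Nat → Nat → Nat
  | 0, start, _ => start
  | fuel + 1, start, e =>
    if start < e then
      match arr[(start + e) / 2]? with
      | none => start  -- unreachable, as above
      | some entry =>
        if PySem.Str.startswith entry.1 string_to_find then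
          searchHi string_to_find arr fuel ((start + e) / 2 + 1) e
        else searchHi string_to_find arr fuel start ((start + e) / 2)
    else start

def search (string_to_find : String) (indexed_suffix_array : List (String × Int)) : List (String × Int) :=
  let start := searchLo string_to_find indexed_suffix_array indexed_suffix_array.length 0 indexed_suffix_array.length
  let init_start := start
  let start' := searchHi string_to_find indexed_suffix_array (indexed_suffix_array.length - start) start indexed_suffix_array.length
  -- [indexed_suffix_array[i] for i in range(init_start, start)]; every index is in range here,
  -- so xs[i] is the getD below
  (List.range' init_start (start' - init_start)).map (fun i => indexed_suffix_array.getD i ("", 0))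

-- ===== PORT B =====
def search_alt (string_to_find : String) (indexed_suffix_array : List (String × Int)) : List (String × Int) :=
  indexed_suffix_array.filter (fun entry => PySem.Str.startswith entry.1 string_to_find)

-- ===== PRECONDITION & SPEC =====
-- Pre_ excludes arrays whose first components are neither sorted ascending (a suffix array is
-- sorted by construction) nor degenerate for the searches (all entries below the query, or all
-- matching it — e.g. an empty query): on other unsorted arrays A's binary searches return an
-- accidental index range that no one would specify.
def Pre_search (string_to_find : String) (indexed_suffix_array : List (String × Int)) : Prop :=
  indexed_suffix_array.Pairwise (fun a b => a.1 ≤ b.1) ∨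
  (∀ x ∈ indexed_suffix_array, x.1 < string_to_find) ∨
  (∀ x ∈ indexed_suffix_array, PySem.Str.startswith x.1 string_to_find = true)
instance (string_to_find : String) (indexed_suffix_array : List (String × Int)) : Decidable (Pre_search string_to_find indexed_suffix_array) := by unfold Pre_search; infer_instance

def pvWitness_search : String × (List (String × Int)) := ("a", [("ab", 1)])

def Spec_search (string_to_find : String) (indexed_suffix_array : List (String × Int)) (out : List (String × Int)) : Prop := out = search_alt string_to_find indexed_suffix_array
instance (string_to_find : String) (indexed_suffix_array : List (String × Int)) (out : List (String × Int)) : Decidable (Spec_search string_to_find indexed_suffix_array out) := by unfold Spec_search; infer_instance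

-- ===== CLAIM (what is proved, stated in full; the proofs are below) =====
def Claim_equal_search : Prop := ∀ (string_to_find : String) (indexed_suffix_array : List (String × Int)), Dom_search string_to_find indexed_suffix_array → Pre_search string_to_find indexed_suffix_array → Spec_search string_to_find indexed_suffix_array (search string_to_find indexed_suffix_array)

-- ===== LEMMAS AND PROOFS =====

-- cons-level inversion of the lexicographic order on List Char
lemma charlist_cons_lt_cons_iff (a b : Char) (l l' : List Char) :
    ((a :: l : List Char) < b :: l') ↔ a < b ∨ (a = b ∧ l < l') := by
  constructor
  · intro h
    have h' : List.Lex (· < ·) (a :: l) (b :: l') := h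
    cases h' with
    | cons h => exact Or.inr ⟨rfl, h⟩
    | rel h => exact Or.inl h
  · rintro (h | ⟨rfl, h⟩)
    · exact List.Lex.rel h
    · exact List.Lex.cons h

lemma charlist_cons_le_cons_iff (a b : Char) (l l' : List Char) :
    ((a :: l : List Char) ≤ b :: l') ↔ a < b ∨ (a = b ∧ l ≤ l') := by
  rw [le_iff_lt_or_eq, le_iff_lt_or_eq, charlist_cons_lt_cons_iff]
  constructor
  · rintro ((h | ⟨rfl, h⟩) | h)
    · exact Or.inl h
    · exact Or.inr ⟨rfl, Or.inl h⟩
    · injection h with h1 h2; exact Or.inr ⟨h1, Or.inr h2⟩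
  · rintro (h | ⟨rfl, (h | rfl)⟩)
    · exact Or.inl (Or.inl h)
    · exact Or.inl (Or.inr ⟨rfl, h⟩)
    · exact Or.inr rfl

lemma charlist_not_cons_le_nil (a : Char) (l : List Char) : ¬ ((a :: l : List Char) ≤ []) :=
  fun h => absurd (List.nil_lt_cons a l) h.not_gt

-- a prefix is ≤ in the lexicographic order
lemma charlist_le_of_prefix : ∀ (q s : List Char), q <+: s → q ≤ s
  | [], [], _ => le_rfl
  | [], _ :: _, _ => (List.nil_lt_cons _ _).le
  | _ :: _, s, h => by
    obtain ⟨t, rfl⟩ := h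
    exact List.cons_le_cons _ (charlist_le_of_prefix _ _ ⟨t, rfl⟩)

-- strings sharing a prefix form a lexicographic interval
lemma charlist_prefix_of_between : ∀ (q t s : List Char), q ≤ t → t ≤ s → q <+: s → q <+: t
  | [], _, _, _, _, _ => List.nil_prefix
  | c :: q', t, s, hqt, hts, hqs => by
    match t with
    | [] => exact absurd hqt (charlist_not_cons_le_nil _ _)
    | d :: t' =>
      obtain ⟨u, hu⟩ := hqs
      match s, hu with
      | _, rfl =>
        simp only [List.cons_append] at hts
        rw [charlist_cons_le_cons_iff] at hqt hts
        rcases hqt with h1 | ⟨rfl, h1⟩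
        · rcases hts with h2 | ⟨rfl, _⟩
          · exact absurd (h1.trans h2) (lt_irrefl _)
          · exact absurd h1 (lt_irrefl _)
        · rcases hts with h2 | ⟨_, h2⟩
          · exact absurd h2 (lt_irrefl _)
          · exact List.cons_prefix_cons.mpr
              ⟨rfl, charlist_prefix_of_between q' t' _ h1 h2 ⟨u, rfl⟩⟩

-- the same three facts lifted to String
lemma str_le_of_startswith (q s : String) (h : PySem.Str.startswith s q = true) : q ≤ s := by
  rw [String.le_iff_toList_le]
  exact charlist_le_of_prefix _ _ (by simpa [PySem.Str.startswith_eq, PySem.Chars.startswith_iff] using h)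

lemma str_startswith_of_between (q t s : String) (hqt : q ≤ t) (hts : t ≤ s)
    (h : PySem.Str.startswith s q = true) : PySem.Str.startswith t q = true := by
  rw [PySem.Str.startswith_eq, PySem.Chars.startswith_iff]
  rw [String.le_iff_toList_le] at hqt hts
  rw [PySem.Str.startswith_eq, PySem.Chars.startswith_iff] at h
  exact charlist_prefix_of_between _ _ _ hqt hts h

-- pointwise form of sortedness
lemma sorted_getD_mono (arr : List (String × Int)) (hp : arr.Pairwise (fun a b => a.1 ≤ b.1))
    (i j : Nat) (hij : i ≤ j) (hj : j < arr.length) :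
    (arr.getD i ("", 0)).1 ≤ (arr.getD j ("", 0)).1 := by
  rcases Nat.lt_or_ge i j with h | h
  · have := (List.pairwise_iff_getElem.mp hp) i j (h.trans hj) hj h
    rwa [List.getD_eq_getElem _ _ (h.trans hj), List.getD_eq_getElem _ _ hj]
  · have : i = j := le_antisymm hij h
    subst this; exact le_rfl

-- loop 1 returns the lower bound of string_to_find
lemma searchLo_spec (q : String) (arr : List (String × Int))
    (hp : arr.Pairwise (fun a b => a.1 ≤ b.1)) :
    ∀ (fuel s e : Nat), e - s ≤ fuel → s ≤ e → e ≤ arr.length →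
    (∀ i, i < s → (arr.getD i ("", 0)).1 < q) →
    (∀ i, e ≤ i → i < arr.length → q ≤ (arr.getD i ("", 0)).1) →
    searchLo q arr fuel s e ≤ arr.length ∧
    (∀ i, i < searchLo q arr fuel s e → i < arr.length → (arr.getD i ("", 0)).1 < q) ∧
    (∀ i, searchLo q arr fuel s e ≤ i → i < arr.length → q ≤ (arr.getD i ("", 0)).1) := by
  intro fuel
  induction fuel with
  | zero =>
    intro s e hm hse hen hlo hhi
    simp only [searchLo]
    exact ⟨by omega, fun i hi _ => hlo i hi, fun i hi h2 => hhi i (by omega) h2⟩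
  | succ f IH =>
      intro s e hm hse hen hlo hhi
      rw [searchLo]
      by_cases h : s < e
      · simp only [h, if_true]
        have hmlt : (s + e) / 2 < arr.length := by omega
        have hkey : arr.getD ((s + e) / 2) ("", 0) = arr[(s + e) / 2] :=
          List.getD_eq_getElem _ _ hmlt
        rw [List.getElem?_eq_getElem hmlt]
        simp only []
        by_cases hc : (arr[(s + e) / 2]).1 < q
        · simp only [hc, if_true]
          refine IH _ _ (by omega) (by omega) hen ?_ hhi
          intro i hi
          have h1 : (arr.getD i ("", 0)).1 ≤ (arr.getD ((s + e) / 2) ("", 0)).1 :=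
            sorted_getD_mono arr hp i _ (by omega) hmlt
          rw [hkey] at h1
          exact lt_of_le_of_lt h1 hc
        · simp only [hc, if_false]
          refine IH _ _ (by omega) (by omega) (by omega) hlo ?_
          intro i h1 h2
          have h3 : (arr.getD ((s + e) / 2) ("", 0)).1 ≤ (arr.getD i ("", 0)).1 :=
            sorted_getD_mono arr hp _ i h1 h2
          rw [hkey] at h3
          exact le_trans (le_of_not_gt hc) h3
      · simp only [h, if_false]
        have hse' : s = e := by omega
        exact ⟨by omega, fun i hi _ => hlo i hi, fun i hi h2 => hhi i (by omega) h2⟩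

-- loop 2 returns the upper edge of the startswith block
lemma searchHi_spec (q : String) (arr : List (String × Int))
    (hp : arr.Pairwise (fun a b => a.1 ≤ b.1)) (lb : Nat)
    (hq : ∀ i, lb ≤ i → i < arr.length → q ≤ (arr.getD i ("", 0)).1) :
    ∀ (fuel s e : Nat), e - s ≤ fuel → lb ≤ s → s ≤ e → e ≤ arr.length →
    (∀ i, lb ≤ i → i < s → PySem.Str.startswith (arr.getD i ("", 0)).1 q = true) →
    (∀ i, e ≤ i → i < arr.length → ¬ PySem.Str.startswith (arr.getD i ("", 0)).1 q = true) →
    s ≤ searchHi q arr fuel s e ∧ searchHi q arr fuel s e ≤ arr.length ∧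
    (∀ i, lb ≤ i → i < searchHi q arr fuel s e → PySem.Str.startswith (arr.getD i ("", 0)).1 q = true) ∧
    (∀ i, searchHi q arr fuel s e ≤ i → i < arr.length → ¬ PySem.Str.startswith (arr.getD i ("", 0)).1 q = true) := by
  intro fuel
  induction fuel with
  | zero =>
    intro s e hm hls hse hen hin hout
    simp only [searchHi]
    exact ⟨le_rfl, by omega, fun i h1 h2 => hin i h1 h2, fun i hi h2 => hout i (by omega) h2⟩
  | succ f IH =>
      intro s e hm hls hse hen hin hout
      rw [searchHi]
      by_cases h : s < e
      · simp only [h, if_true]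
        have hmlt : (s + e) / 2 < arr.length := by omega
        have hkey : arr.getD ((s + e) / 2) ("", 0) = arr[(s + e) / 2] :=
          List.getD_eq_getElem _ _ hmlt
        rw [List.getElem?_eq_getElem hmlt]
        simp only []
        by_cases hc : PySem.Str.startswith (arr[(s + e) / 2]).1 q = true
        · simp only [hc, if_true]
          have hnew : ∀ i, lb ≤ i → i < (s + e) / 2 + 1 →
              PySem.Str.startswith (arr.getD i ("", 0)).1 q = true := by
            intro i h1 h2
            exact str_startswith_of_between q (arr.getD i ("", 0)).1
              (arr.getD ((s + e) / 2) ("", 0)).1 (hq i h1 (by omega))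
              (sorted_getD_mono arr hp i _ (by omega) hmlt) (by rw [hkey]; exact hc)
          obtain ⟨r1, r2, r3, r4⟩ :=
            IH _ _ (by omega) (by omega) (by omega) hen hnew hout
          exact ⟨by omega, r2, r3, r4⟩
        · simp only [hc]
          have hnew : ∀ i, (s + e) / 2 ≤ i → i < arr.length →
              ¬ PySem.Str.startswith (arr.getD i ("", 0)).1 q = true := by
            intro i h1 h2 hpi
            refine hc ?_
            rw [← hkey]
            exact str_startswith_of_between q (arr.getD ((s + e) / 2) ("", 0)).1
              (arr.getD i ("", 0)).1 (hq _ (by omega) hmlt)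
              (sorted_getD_mono arr hp _ i h1 h2) hpi
          exact IH _ _ (by omega) hls (by omega) (by omega) hin hnew
      · simp only [h, if_false]
        have hse' : s = e := by omega
        exact ⟨le_rfl, by omega, hin, fun i hi h2 => hout i (by omega) h2⟩

-- range-indexing of a contiguous segment is drop/take
lemma range'_map_getD {α : Type} (d : α) (l : List α) (lb k : Nat) (h : lb + k ≤ l.length) :
    (List.range' lb k).map (fun i => l.getD i d) = (l.drop lb).take k := by
  apply List.ext_getElem
  · simp only [List.length_map, List.length_range', List.length_take, List.length_drop]
    omega
  · intro i h1 h2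
    simp only [List.getElem_map, List.getElem_range', List.getElem_take, List.getElem_drop, one_mul]
    simp only [List.length_map, List.length_range'] at h1
    rw [List.getD_eq_getElem _ _ (by omega)]

-- a predicate that holds exactly on an index interval: filter is that segment
lemma filter_eq_drop_take {α : Type} (p : α → Bool) :
    ∀ (l : List α) (lb ub : Nat), lb ≤ ub → ub ≤ l.length →
    (∀ i (h : i < l.length), (p l[i] = true ↔ (lb ≤ i ∧ i < ub))) →
    l.filter p = (l.drop lb).take (ub - lb) := by
  intro l
  induction l with
  | nil => intro lb ub h1 h2 h3; simp
  | cons x l' IH =>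
    intro lb ub h1 h2 h3
    cases lb with
    | zero =>
      cases ub with
      | zero =>
        simp only [List.drop_zero, Nat.sub_zero, List.take_zero]
        refine List.filter_eq_nil_iff.mpr ?_
        intro a ha
        obtain ⟨i, hi, rfl⟩ := List.mem_iff_getElem.mp ha
        intro hpa
        have := (h3 i hi).mp hpa
        omega
      | succ u =>
        have hpx : p x = true := by
          have := (h3 0 (by simp)).mpr (by omega)
          simpa using this
        rw [List.filter_cons_of_pos hpx]
        simp only [List.drop_zero, Nat.sub_zero, List.take_succ_cons]
        congr 1
        have hiff : ∀ i (h : i < l'.length), (p l'[i] = true ↔ (0 ≤ i ∧ i < u)) := by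
          intro i hi
          have := h3 (i + 1) (by simp; omega)
          simp only [List.getElem_cons_succ] at this
          rw [this]
          omega
        have := IH 0 u (by omega) (by simp at h2; omega) hiff
        simpa using this
    | succ b =>
      have hpx : p x = false := by
        by_cases hx : p x = true
        · have := (h3 0 (by simp)).mp (by simpa using hx)
          omega
        · exact eq_false_of_ne_true hx
      rw [List.filter_cons_of_neg (by simp [hpx]), List.drop_succ_cons]
      have harith : ub - (b + 1) = (ub - 1) - b := by omega
      rw [harith]
      refine IH b (ub - 1) (by omega) (by simp at h2; omega) ?_
      intro i hi
      have := h3 (i + 1) (by simp; omega)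
      simp only [List.getElem_cons_succ] at this
      rw [this]
      omega

-- loop 1 walks to e when every entry is below the query
lemma searchLo_all_lt (q : String) (arr : List (String × Int))
    (hall : ∀ x ∈ arr, x.1 < q) :
    ∀ (fuel s e : Nat), e - s ≤ fuel → s ≤ e → e ≤ arr.length → searchLo q arr fuel s e = e := by
  intro fuel
  induction fuel with
  | zero => intro s e h1 h2 h3; simp only [searchLo]; omega
  | succ f IH =>
    intro s e h1 h2 h3
    rw [searchLo]
    by_cases h : s < e
    · simp only [h, if_true]
      have hmlt : (s + e) / 2 < arr.length := by omega
      rw [List.getElem?_eq_getElem hmlt]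
      simp only []
      rw [if_pos (hall _ (List.getElem_mem hmlt))]
      exact IH _ _ (by omega) (by omega) h3
    · simp only [h, if_false]; omega

-- loop 1 stays at s when every entry matches the query
lemma searchLo_all_match (q : String) (arr : List (String × Int))
    (hall : ∀ x ∈ arr, PySem.Str.startswith x.1 q = true) :
    ∀ (fuel s e : Nat), e ≤ arr.length → searchLo q arr fuel s e = s := by
  intro fuel
  induction fuel with
  | zero => intro s e h3; simp only [searchLo]
  | succ f IH =>
    intro s e h3
    rw [searchLo]
    by_cases h : s < e
    · simp only [h, if_true]
      have hmlt : (s + e) / 2 < arr.length := by omega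
      rw [List.getElem?_eq_getElem hmlt]
      simp only []
      rw [if_neg (not_lt_of_ge (str_le_of_startswith q _ (hall _ (List.getElem_mem hmlt))))]
      exact IH _ _ (by omega)
    · simp only [h, if_false]

-- loop 2 stays at s when no entry matches the query
lemma searchHi_none (q : String) (arr : List (String × Int))
    (hnone : ∀ x ∈ arr, ¬ PySem.Str.startswith x.1 q = true) :
    ∀ (fuel s e : Nat), e ≤ arr.length → searchHi q arr fuel s e = s := by
  intro fuel
  induction fuel with
  | zero => intro s e h3; simp only [searchHi]
  | succ f IH =>
    intro s e h3
    rw [searchHi]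
    by_cases h : s < e
    · simp only [h, if_true]
      have hmlt : (s + e) / 2 < arr.length := by omega
      rw [List.getElem?_eq_getElem hmlt]
      simp only []
      rw [if_neg (hnone _ (List.getElem_mem hmlt))]
      exact IH _ _ (by omega)
    · simp only [h, if_false]

-- loop 2 walks to e when every entry matches the query
lemma searchHi_all_match (q : String) (arr : List (String × Int))
    (hall : ∀ x ∈ arr, PySem.Str.startswith x.1 q = true) :
    ∀ (fuel s e : Nat), e - s ≤ fuel → s ≤ e → e ≤ arr.length → searchHi q arr fuel s e = e := by
  intro fuel
  induction fuel with
  | zero => intro s e h1 h2 h3; simp only [searchHi]; omega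
  | succ f IH =>
    intro s e h1 h2 h3
    rw [searchHi]
    by_cases h : s < e
    · simp only [h, if_true]
      have hmlt : (s + e) / 2 < arr.length := by omega
      rw [List.getElem?_eq_getElem hmlt]
      simp only []
      rw [if_pos (hall _ (List.getElem_mem hmlt))]
      exact IH _ _ (by omega) (by omega) h3
    · simp only [h, if_false]; omega

-- the sorted case of the verdict
lemma search_eq_of_sorted (q : String) (arr : List (String × Int))
    (hp : arr.Pairwise (fun a b => a.1 ≤ b.1)) :
    search q arr = search_alt q arr := by
  unfold search search_alt
  set n := arr.length with hn
  obtain ⟨hlbn, hL, hR⟩ :=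
    searchLo_spec q arr hp n 0 n (by omega) (Nat.zero_le _) le_rfl (by omega)
      (by intro i h1 h2; omega)
  set lb := searchLo q arr n 0 n with hlb
  obtain ⟨hslb, hubn, hM, hN⟩ :=
    searchHi_spec q arr hp lb hR (n - lb) lb n (by omega) le_rfl hlbn le_rfl
      (by intro i _ h2; omega) (by intro i h1 h2; omega)
  set ub := searchHi q arr (n - lb) lb n with hub
  rw [filter_eq_drop_take _ arr lb ub hslb hubn ?_, range'_map_getD _ arr lb (ub - lb) (by omega)]
  intro i hi
  constructor
  · intro hpi
    constructor
    · by_contra hlt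
      have h1 : (arr.getD i ("", 0)).1 < q := hL i (by omega) hi
      have h2 : q ≤ (arr.getD i ("", 0)).1 := by
        refine str_le_of_startswith q _ ?_
        rwa [List.getD_eq_getElem _ _ hi]
      exact absurd h2 (not_le_of_gt h1)
    · by_contra hge
      exact hN i (by omega) hi (by rwa [List.getD_eq_getElem _ _ hi])
  · rintro ⟨h1, h2⟩
    have := hM i h1 h2
    rwa [List.getD_eq_getElem _ _ hi] at this

-- ===== VERDICT (by name: the statement is the Claim_ definition above) =====
theorem search_spec : Claim_equal_search := by
  intro q arr _hdom hpre
  unfold Spec_search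
  rcases hpre with hp | hall | hall
  · exact search_eq_of_sorted q arr hp
  · -- every entry below the query: both sides return []
    have hnone : ∀ x ∈ arr, ¬ PySem.Str.startswith x.1 q = true := fun x hx hpx =>
      absurd (str_le_of_startswith q x.1 hpx) (not_le_of_gt (hall x hx))
    simp only [search, search_alt]
    rw [searchLo_all_lt q arr hall _ 0 arr.length (by omega) (by omega) le_rfl,
      searchHi_none q arr hnone _ _ _ le_rfl]
    simp only [Nat.sub_self, List.range'_zero, List.map_nil]
    exact (List.filter_eq_nil_iff.mpr hnone).symm
  · -- every entry matches the query: both sides return the whole array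
    simp only [search, search_alt]
    rw [searchLo_all_match q arr hall _ 0 arr.length le_rfl,
      searchHi_all_match q arr hall _ 0 arr.length (by omega) (by omega) le_rfl,
      Nat.sub_zero, range'_map_getD ("", 0) arr 0 arr.length (by omega),
      List.drop_zero, List.take_length]
    exact (List.filter_eq_self.mpr hall).symm
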